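-- pv_equiv track=rewrite | github.com/Laeglaur/wechat_crawler_for_mac | wechat_crawler_wo_ref.py | sort_grid_positions
-- ===== SOURCE A (Python) =====
-- def sort_grid_positions(positions, y_tolerance=5):
--     """
--     排序2D坐标：整体从上往下，每行从左往右
--     y_tolerance: Y坐标容差，小于此值视为同一行
--     """
--     # 按Y坐标分组
--     sorted_by_y = sorted(positions, key=lambda p: p[1])
--
--     rows = []
--     current_row = [sorted_by_y[0]]
--     current_y = sorted_by_y[0][1]
--
--     for point in sorted_by_y[1:]:
--         if abs(point[1] - current_y) <= y_tolerance:
--             current_row.append(point)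
--         else:
--             # 对当前行按X坐标排序
--             rows.append(sorted(current_row, key=lambda p: p[0]))
--             current_row = [point]
--             current_y = point[1]
--
--     # 处理最后一行
--     if current_row:
--         rows.append(sorted(current_row, key=lambda p: p[0]))
--
--     # 展平结果
--     return [point for row in rows for point in row]
-- ===== SOURCE B (Python) =====
-- def sort_grid_positions(positions, y_tolerance=5):
--     """Peel rows off the point set by repeated minimum-y extraction: the point
--     with the smallest y seeds a row, every remaining point within y_tolerance
--     of it joins, and the row is emitted sorted by (x, y).  No global y-sort."""
--     result = []
--     remaining = list(positions)
--     while remaining: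
--         seed = min(remaining, key=lambda p: p[1])
--         remaining.remove(seed)
--         row = [seed] + [p for p in remaining if p[1] - seed[1] <= y_tolerance]
--         remaining = [p for p in remaining if p[1] - seed[1] > y_tolerance]
--         result.extend(sorted(row, key=lambda p: (p[0], p[1])))
--     return result
-- ===== Notes on version B (the rewrite author's own statement) =====
-- stated objective: alternative
-- what changed: B never sorts the points by y: it peels rows off the unsorted set by repeated minimum-y extraction (the first min-y point seeds a row, remaining points within tolerance join it) and emits each row sorted by the (x, y) pair, whereas A sorts everything by y, scans for row breaks, sorts each row by x and flattens; Pre_ excludes only the empty list, on which A raises IndexError and B returns [].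
-- outside the precondition, e.g. on sort_grid_positions([], 5): A raises IndexError, B returns []
import Mathlib
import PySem

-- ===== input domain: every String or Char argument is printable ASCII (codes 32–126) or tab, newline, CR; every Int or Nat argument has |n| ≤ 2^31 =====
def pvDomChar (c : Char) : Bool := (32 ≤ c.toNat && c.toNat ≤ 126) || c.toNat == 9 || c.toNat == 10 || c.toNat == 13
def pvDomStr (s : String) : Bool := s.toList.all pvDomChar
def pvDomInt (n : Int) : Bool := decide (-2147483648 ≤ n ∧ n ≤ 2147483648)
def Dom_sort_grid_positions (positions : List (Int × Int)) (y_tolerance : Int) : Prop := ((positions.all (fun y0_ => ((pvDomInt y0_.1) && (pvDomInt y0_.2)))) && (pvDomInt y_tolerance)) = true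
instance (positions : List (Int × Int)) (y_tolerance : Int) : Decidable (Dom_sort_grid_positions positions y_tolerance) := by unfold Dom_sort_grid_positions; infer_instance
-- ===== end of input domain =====

-- B is a different algorithm: no global y-sort — it peels rows off the unsorted set by
-- repeated minimum-y extraction and emits each row sorted by the (x, y) pair
-- (objective: alternative; same results, not claimed faster).

-- ===== PORT A =====
-- loop body of A's 'for point in sorted_by_y[1:]': state = (rows, current_row, current_y)
def stepA (y_tolerance : Int) (st : List (List (Int × Int)) × List (Int × Int) × Int)
    (point : Int × Int) : List (List (Int × Int)) × List (Int × Int) × Int :=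
  if |point.2 - st.2.2| ≤ y_tolerance then (st.1, st.2.1 ++ [point], st.2.2)
  else (st.1 ++ [PySem.List.sorted st.2.1 (fun p => p.1) false], [point], point.2)

def sort_grid_positions (positions : List (Int × Int)) (y_tolerance : Int) : List (Int × Int) :=
  match PySem.List.sorted positions (fun p => p.2) false with
  | [] => []   -- unreachable under Pre_ (Python raises IndexError on sorted_by_y[0])
  | h :: t =>
    let st := t.foldl (stepA y_tolerance) ([], [h], h.2)
    let rows := if st.2.1.isEmpty then st.1
                else st.1 ++ [PySem.List.sorted st.2.1 (fun p => p.1) false]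
    rows.flatten

-- ===== PORT B =====
-- 'remaining.remove(seed)' shrinks the list: needed for the while loop's termination
theorem pvRemoveLen {α : Type} [BEq α] {xs rest : List α} {v : α}
    (h : PySem.List.remove? xs v = some rest) : rest.length < xs.length := by
  unfold PySem.List.remove? at h
  cases hk : List.idxOf? v xs with
  | none => rw [hk] at h; simp at h
  | some k =>
    rw [hk] at h
    simp only [Option.map_some, Option.some.injEq] at h
    have hklt : k < xs.length := by
      unfold List.idxOf? at hk
      exact (List.findIdx?_eq_some_iff_findIdx_eq.mp hk).1
    rw [← h, List.length_eraseIdx_of_lt hklt]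
    omega

-- B's while loop: extract the first minimum-y point, collect its row, recurse on the rest
def goB (tol : Int) (remaining : List (Int × Int)) : List (Int × Int) :=
  match hm : PySem.List.min? remaining (fun p => p.2) with
  | none => []          -- 'while remaining' ends
  | some seed =>
    match hr : PySem.List.remove? remaining seed with
    | none => []        -- unreachable: seed ∈ remaining
    | some rest =>
      PySem.List.sorted (seed :: rest.filter (fun p => decide (p.2 - seed.2 ≤ tol)))
          (fun p => toLex (p.1, p.2)) false
        ++ goB tol (rest.filter (fun p => decide (p.2 - seed.2 > tol)))
termination_by remaining.length
decreasing_by exact lt_of_le_of_lt (List.length_filter_le _ _) (pvRemoveLen hr)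

def sort_grid_positions_alt (positions : List (Int × Int)) (y_tolerance : Int) : List (Int × Int) :=
  goB y_tolerance positions

-- ===== PRECONDITION & SPEC =====
-- Pre_ excludes only the empty list, on which A raises IndexError (sorted_by_y[0]); B returns [] there.
def Pre_sort_grid_positions (positions : List (Int × Int)) (y_tolerance : Int) : Prop :=
  positions ≠ []
instance (positions : List (Int × Int)) (y_tolerance : Int) : Decidable (Pre_sort_grid_positions positions y_tolerance) := by unfold Pre_sort_grid_positions; infer_instance

def pvWitness_sort_grid_positions : (List (Int × Int)) × Int := ([(1, 2), (3, 40), (0, 41)], 5)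

def Spec_sort_grid_positions (positions : List (Int × Int)) (y_tolerance : Int) (out : List (Int × Int)) : Prop := out = sort_grid_positions_alt positions y_tolerance
instance (positions : List (Int × Int)) (y_tolerance : Int) (out : List (Int × Int)) : Decidable (Spec_sort_grid_positions positions y_tolerance out) := by unfold Spec_sort_grid_positions; infer_instance

-- ===== CLAIM (what is proved, stated in full; the proofs are below) =====
def Claim_equal_sort_grid_positions : Prop := ∀ (positions : List (Int × Int)) (y_tolerance : Int), Dom_sort_grid_positions positions y_tolerance → Pre_sort_grid_positions positions y_tolerance → Spec_sort_grid_positions positions y_tolerance (sort_grid_positions positions y_tolerance)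

-- ===== LEMMAS AND PROOFS =====

-- the common reference point: peel rows off a y-SORTED list, each row sorted by (x, y)
def peel (tol : Int) : List (Int × Int) → List (Int × Int)
  | [] => []
  | h :: t =>
    PySem.List.sorted (h :: t.takeWhile (fun p => decide (|p.2 - h.2| ≤ tol)))
        (fun p => toLex (p.1, p.2)) false
      ++ peel tol (t.dropWhile (fun p => decide (|p.2 - h.2| ≤ tol)))
termination_by l => l.length
decreasing_by exact Nat.lt_succ_of_le (List.length_dropWhile_le _ _)

theorem klex_inj : Function.Injective (fun p : Int × Int => toLex (p.1, p.2)) := by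
  intro a b h
  have := toLex.injective h
  exact Prod.ext (congrArg Prod.fst this) (congrArg Prod.snd this)

-- ===== generic insertion-sort facts (about PySem.List.sorted's insertBy loop) =====

theorem insertBy_congr_mem {α : Type} {b1 b2 : α → α → Bool} {x : α} {l : List α}
    (h : ∀ q ∈ l, b1 x q = b2 x q) :
    PySem.List.insertBy b1 x l = PySem.List.insertBy b2 x l := by
  induction l with
  | nil => rfl
  | cons a l ih =>
    simp only [PySem.List.insertBy, h a (by simp)]
    by_cases hb : b2 x a
    · simp [hb]
    · simp only [hb, if_false]
      rw [ih fun q hq => h q (by simp [hq])]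

theorem insertBy_eq_cons {α : Type} {b : α → α → Bool} {x : α} {l : List α}
    (h : ∀ q ∈ l, b x q = true) : PySem.List.insertBy b x l = x :: l := by
  cases l with
  | nil => rfl
  | cons a l => simp [PySem.List.insertBy, h a (by simp)]

theorem foldl_insert_cons_min {α : Type} {b : α → α → Bool} {m : α} (v : List α)
    (hv : ∀ q ∈ v, b q m = false) : ∀ acc : List α,
    v.foldl (fun acc x => PySem.List.insertBy b x acc) (m :: acc)
      = m :: v.foldl (fun acc x => PySem.List.insertBy b x acc) acc := by
  induction v with
  | nil => intro acc; rfl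
  | cons q v ih =>
    intro acc
    simp only [List.foldl_cons, PySem.List.insertBy, hv q (by simp), if_false]
    exact ih (fun z hz => hv z (by simp [hz])) _

theorem insertBy_pairwise {α κ : Type} [LinearOrder κ] {key : α → κ} {x : α} {l : List α}
    (hl : l.Pairwise (fun a b => key a ≤ key b)) :
    (PySem.List.insertBy (fun a b => decide (key a < key b)) x l).Pairwise
      (fun a b => key a ≤ key b) := by
  induction l with
  | nil => simp [PySem.List.insertBy]
  | cons h t ih =>
    rcases List.pairwise_cons.mp hl with ⟨hh, ht⟩
    by_cases hb : key x < key h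
    · simp only [PySem.List.insertBy, hb, decide_true, if_true]
      refine List.pairwise_cons.mpr ⟨?_, hl⟩
      intro y hy
      rcases List.mem_cons.mp hy with rfl | hy
      · exact le_of_lt hb
      · exact le_trans (le_of_lt hb) (hh y hy)
    · simp only [PySem.List.insertBy, hb, decide_false, if_false]
      refine List.pairwise_cons.mpr ⟨?_, ih ht⟩
      intro y hy
      rcases (PySem.List.mem_insertBy _ _ _ _).mp hy with hy | hy
      · exact hy ▸ not_lt.mp hb
      · exact hh y hy

theorem filter_insertBy {α κ : Type} [LinearOrder κ] {key : α → κ} (p : α → Bool) (x : α)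
    {l : List α} (hl : l.Pairwise (fun a b => key a ≤ key b)) :
    (PySem.List.insertBy (fun a b => decide (key a < key b)) x l).filter p
      = if p x then PySem.List.insertBy (fun a b => decide (key a < key b)) x (l.filter p)
        else l.filter p := by
  induction l with
  | nil => by_cases hp : p x <;> simp [PySem.List.insertBy, hp]
  | cons h t ih =>
    rcases List.pairwise_cons.mp hl with ⟨hh, ht⟩
    by_cases hb : key x < key h
    · simp only [PySem.List.insertBy, hb, decide_true, if_true]
      by_cases hp : p x
      · have hall : ∀ q ∈ (h :: t).filter p, decide (key x < key q) = true := by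
          intro q hq
          rcases List.mem_cons.mp (List.mem_of_mem_filter hq) with rfl | hq'
          · exact decide_eq_true hb
          · exact decide_eq_true (lt_of_lt_of_le hb (hh q hq'))
        rw [insertBy_eq_cons hall]
        simp [hp]
      · simp [hp]
    · simp only [PySem.List.insertBy, hb, decide_false, Bool.false_eq_true, if_false]
      by_cases hph : p h
      · simp only [List.filter_cons, hph, if_true]
        rw [ih ht]
        by_cases hp : p x
        · simp only [hp, if_true, PySem.List.insertBy, hb, decide_false, if_false]
          simp [List.filter_cons, hph]
        · simp [hp, List.filter_cons, hph]
      · simp only [List.filter_cons, hph, if_false]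
        rw [ih ht]
        simp [List.filter_cons, hph]

-- stable sorting commutes with filtering
theorem sorted_filter {α κ : Type} [LinearOrder κ] (key : α → κ) (p : α → Bool) (l : List α) :
    PySem.List.sorted (l.filter p) key false = (PySem.List.sorted l key false).filter p := by
  have aux : ∀ (l : List α) (acc : List α), acc.Pairwise (fun a b => key a ≤ key b) →
      (l.filter p).foldl (fun acc x => PySem.List.insertBy (fun a b => decide (key a < key b)) x acc) (acc.filter p)
        = (l.foldl (fun acc x => PySem.List.insertBy (fun a b => decide (key a < key b)) x acc) acc).filter p := by
    intro l
    induction l with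
    | nil => intro acc _; rfl
    | cons x l ih =>
      intro acc hacc
      by_cases hp : p x
      · simp only [List.filter_cons, hp, if_true, List.foldl_cons]
        rw [show PySem.List.insertBy (fun a b => decide (key a < key b)) x (acc.filter p)
              = (PySem.List.insertBy (fun a b => decide (key a < key b)) x acc).filter p by
            rw [filter_insertBy p x hacc, if_pos hp]]
        exact ih _ (insertBy_pairwise hacc)
      · simp only [List.filter_cons, hp, if_false, List.foldl_cons]
        rw [show acc.filter p = (PySem.List.insertBy (fun a b => decide (key a < key b)) x acc).filter p by
            rw [filter_insertBy p x hacc, if_neg (by simp [hp])]]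
        exact ih _ (insertBy_pairwise hacc)
  rw [PySem.List.sorted_eq_foldl_insertBy, PySem.List.sorted_eq_foldl_insertBy]
  simpa using aux l [] (by simp)

-- ===== min-extraction: the first minimum-y point heads the stable y-sort =====

theorem min?_cons_step (a x : Int × Int) (l : List (Int × Int)) :
    PySem.List.min? (a :: x :: l) (fun p => p.2)
      = PySem.List.min? ((if x.2 < a.2 then x else a) :: l) (fun p => p.2) := by
  by_cases hx : x.2 < a.2 <;> simp [PySem.List.min?, hx]

theorem min?_cons_split : ∀ (l : List (Int × Int)) (a m : Int × Int),
    PySem.List.min? (a :: l) (fun p => p.2) = some m →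
    m = a ∨ (∃ u v, l = u ++ m :: v ∧ m.2 < a.2 ∧ ∀ q ∈ u, m.2 < q.2) := by
  intro l
  induction l with
  | nil =>
    intro a m h
    simp [PySem.List.min?] at h
    exact Or.inl h.symm
  | cons x l ih =>
    intro a m h
    rw [min?_cons_step] at h
    by_cases hx : x.2 < a.2
    · rw [if_pos hx] at h
      rcases ih x m h with rfl | ⟨u, v, rfl, hlt, hu⟩
      · exact Or.inr ⟨[], l, rfl, hx, by simp⟩
      · refine Or.inr ⟨x :: u, v, rfl, lt_trans hlt hx, ?_⟩
        intro q hq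
        rcases List.mem_cons.mp hq with rfl | hq
        · exact hlt
        · exact hu q hq
    · rw [if_neg hx] at h
      rcases ih a m h with rfl | ⟨u, v, rfl, hlt, hu⟩
      · exact Or.inl rfl
      · refine Or.inr ⟨x :: u, v, rfl, hlt, ?_⟩
        intro q hq
        rcases List.mem_cons.mp hq with rfl | hq
        · exact lt_of_lt_of_le hlt (not_lt.mp hx)
        · exact hu q hq

theorem min?_split {l : List (Int × Int)} {m : Int × Int}
    (h : PySem.List.min? l (fun p => p.2) = some m) :
    ∃ u v, l = u ++ m :: v ∧ ∀ q ∈ u, m.2 < q.2 := by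
  cases l with
  | nil => simp [PySem.List.min?] at h
  | cons x l =>
    rcases min?_cons_split l x m h with rfl | ⟨u, v, rfl, hlt, hu⟩
    · exact ⟨[], l, rfl, by simp⟩
    · refine ⟨x :: u, v, rfl, ?_⟩
      intro q hq
      rcases List.mem_cons.mp hq with rfl | hq
      · exact hlt
      · exact hu q hq

theorem remove?_of_split {u v : List (Int × Int)} {m : Int × Int}
    (hu : ∀ q ∈ u, q ≠ m) : PySem.List.remove? (u ++ m :: v) m = some (u ++ v) := by
  induction u with
  | nil =>
    unfold PySem.List.remove? List.idxOf?
    simp only [List.nil_append]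
    rw [List.findIdx?_cons]
    simp
  | cons a u ih =>
    have ha : (a == m) = false := beq_eq_false_iff_ne.mpr (hu a (by simp))
    have ih' := ih fun q hq => hu q (by simp [hq])
    unfold PySem.List.remove? at ih' ⊢
    unfold List.idxOf? at ih' ⊢
    cases hk : List.findIdx? (· == m) (u ++ m :: v) with
    | none => rw [hk] at ih'; simp at ih'
    | some k =>
      rw [hk] at ih'
      simp only [Option.map_some, Option.some.injEq] at ih'
      simp only [List.cons_append, List.findIdx?_cons, ha, cond_false, hk, Option.map_map,
        Option.map_some]
      simp [List.eraseIdx_cons_succ, ih']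

theorem sorted_cons_of_min {u v : List (Int × Int)} {m : Int × Int}
    (hu : ∀ q ∈ u, m.2 < q.2) (hv : ∀ q ∈ v, m.2 ≤ q.2) :
    PySem.List.sorted (u ++ m :: v) (fun p => p.2) false
      = m :: PySem.List.sorted (u ++ v) (fun p => p.2) false := by
  rw [PySem.List.sorted_eq_foldl_insertBy, PySem.List.sorted_eq_foldl_insertBy,
    List.foldl_append, List.foldl_append, List.foldl_cons]
  have h1 : PySem.List.insertBy (fun a b => decide (a.2 < b.2)) m
      (u.foldl (fun acc x => PySem.List.insertBy (fun a b => decide (a.2 < b.2)) x acc) [])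
      = m :: u.foldl (fun acc x => PySem.List.insertBy (fun a b => decide (a.2 < b.2)) x acc) [] := by
    apply insertBy_eq_cons
    intro q hq
    have hq' : q ∈ u := by
      have := PySem.List.mem_sorted (xs := u) (key := fun p : Int × Int => p.2) (rev := false) (x := q)
      rw [PySem.List.sorted_eq_foldl_insertBy] at this
      exact this.mp hq
    exact decide_eq_true (hu q hq')
  rw [h1]
  exact foldl_insert_cons_min v (fun q hq => by simp [not_lt.mpr (hv q hq)]) _

-- ===== monotone predicates on a y-sorted list =====

theorem takeWhile_eq_filter_of_sorted {l : List (Int × Int)} {p : (Int × Int) → Bool}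
    (hl : l.Pairwise (fun a b => a.2 ≤ b.2))
    (hmono : ∀ a ∈ l, ∀ b ∈ l, a.2 ≤ b.2 → p b = true → p a = true) :
    l.takeWhile p = l.filter p := by
  induction l with
  | nil => rfl
  | cons a l ih =>
    rcases List.pairwise_cons.mp hl with ⟨ha, hl'⟩
    by_cases hp : p a
    · simp only [List.takeWhile_cons, List.filter_cons, hp, if_true]
      rw [ih hl' fun x hx y hy => hmono x (by simp [hx]) y (by simp [hy])]
    · simp only [List.takeWhile_cons, List.filter_cons, hp, if_false, Bool.false_eq_true]
      refine (List.filter_eq_nil_iff.mpr ?_).symm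
      intro b hb
      intro hpb
      exact hp (hmono a (by simp) b (by simp [hb]) (ha b hb) hpb)

theorem dropWhile_eq_filter_of_sorted {l : List (Int × Int)} {p : (Int × Int) → Bool}
    (hl : l.Pairwise (fun a b => a.2 ≤ b.2))
    (hmono : ∀ a ∈ l, ∀ b ∈ l, a.2 ≤ b.2 → p b = true → p a = true) :
    l.dropWhile p = l.filter (fun a => ! p a) := by
  induction l with
  | nil => rfl
  | cons a l ih =>
    rcases List.pairwise_cons.mp hl with ⟨ha, hl'⟩
    by_cases hp : p a
    · simp only [List.dropWhile_cons, List.filter_cons, hp, if_true, Bool.not_true,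
        Bool.false_eq_true, if_false]
      exact ih hl' fun x hx y hy => hmono x (by simp [hx]) y (by simp [hy])
    · simp only [List.dropWhile_cons, List.filter_cons, hp, Bool.false_eq_true, if_false,
        Bool.not_false, if_true]
      congr 1
      refine (List.filter_eq_self.mpr ?_).symm
      intro b hb
      by_cases hpb : p b
      · exact absurd (hmono a (by simp) b (by simp [hb]) (ha b hb) hpb) hp
      · simp [hpb]

-- ===== A's per-row x-sort equals the (x, y)-sort on a y-sorted row =====

theorem sortX_eq_sortLex {r : List (Int × Int)} (hr : r.Pairwise (fun a b => a.2 ≤ b.2)) :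
    PySem.List.sorted r (fun p => p.1) false
      = PySem.List.sorted r (fun p => toLex (p.1, p.2)) false := by
  have aux : ∀ (l acc : List (Int × Int)), l.Pairwise (fun a b => a.2 ≤ b.2) →
      (∀ q ∈ acc, ∀ x ∈ l, q.2 ≤ x.2) →
      l.foldl (fun acc x => PySem.List.insertBy (fun a b => decide (a.1 < b.1)) x acc) acc
        = l.foldl (fun acc x => PySem.List.insertBy
            (fun a b => decide (toLex (a.1, a.2) < toLex (b.1, b.2))) x acc) acc := by
    intro l
    induction l with
    | nil => intro acc _ _; rfl
    | cons x l ih =>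
      intro acc hl hacc
      rcases List.pairwise_cons.mp hl with ⟨hx, hl'⟩
      have hins : PySem.List.insertBy (fun a b => decide (a.1 < b.1)) x acc
          = PySem.List.insertBy (fun a b => decide (toLex (a.1, a.2) < toLex (b.1, b.2))) x acc := by
        apply insertBy_congr_mem
        intro q hq
        have hqx : q.2 ≤ x.2 := hacc q hq x (by simp)
        by_cases hlt : x.1 < q.1
        · simp [hlt, Prod.Lex.toLex_lt_toLex]
        · have : ¬ (toLex (x.1, x.2) < toLex (q.1, q.2)) := by
            rw [Prod.Lex.toLex_lt_toLex]
            rintro (h1 | ⟨h1, h2⟩)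
            · exact hlt h1
            · exact absurd h2 (not_lt.mpr hqx)
          simp [hlt, this]
      simp only [List.foldl_cons]
      rw [← hins]
      refine ih _ hl' ?_
      intro q hq y hy
      rcases (PySem.List.mem_insertBy _ _ _ _).mp hq with rfl | hq
      · exact hx y hy
      · exact hacc q hq y (by simp [hy])
  rw [PySem.List.sorted_eq_foldl_insertBy, PySem.List.sorted_eq_foldl_insertBy]
  exact aux r [] hr (by simp)

-- ===== A's fold carves the y-sorted list into runs =====

def runsAux (tol : Int) : List (Int × Int) → List (Int × Int) → Int → List (List (Int × Int))
  | [], cur, _ => [cur]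
  | p :: t, cur, cury =>
    if |p.2 - cury| ≤ tol then runsAux tol t (cur ++ [p]) cury
    else cur :: runsAux tol t [p] p.2

def runsOf (tol : Int) : List (Int × Int) → List (List (Int × Int))
  | [] => []
  | h :: t => (h :: t.takeWhile (fun p => decide (|p.2 - h.2| ≤ tol)))
      :: runsOf tol (t.dropWhile (fun p => decide (|p.2 - h.2| ≤ tol)))
termination_by l => l.length
decreasing_by exact Nat.lt_succ_of_le (List.length_dropWhile_le _ _)

theorem foldA_char (tol : Int) (t : List (Int × Int)) : ∀ rows cur cury, cur ≠ [] →
    (t.foldl (stepA tol) (rows, cur, cury)).2.1 ≠ [] ∧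
    (t.foldl (stepA tol) (rows, cur, cury)).1 ++
      [PySem.List.sorted (t.foldl (stepA tol) (rows, cur, cury)).2.1 (fun p => p.1) false]
    = rows ++ (runsAux tol t cur cury).map (fun g => PySem.List.sorted g (fun p => p.1) false) := by
  induction t with
  | nil => intro rows cur cury h; simpa [runsAux] using h
  | cons p t ih =>
    intro rows cur cury h
    by_cases hc : |p.2 - cury| ≤ tol
    · simpa [stepA, hc, runsAux] using ih rows (cur ++ [p]) cury (by simp)
    · have := ih (rows ++ [PySem.List.sorted cur (fun q => q.1) false]) [p] p.2 (by simp)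
      simpa [stepA, hc, runsAux, List.append_assoc] using this

theorem runsAux_eq_runsOf (tol : Int) (t : List (Int × Int)) : ∀ cur cury,
    runsAux tol t cur cury
      = (cur ++ t.takeWhile (fun p => decide (|p.2 - cury| ≤ tol)))
        :: runsOf tol (t.dropWhile (fun p => decide (|p.2 - cury| ≤ tol))) := by
  induction t with
  | nil => intro cur cury; simp [runsAux, runsOf]
  | cons p t ih =>
    intro cur cury
    by_cases hc : |p.2 - cury| ≤ tol
    · rw [show runsAux tol (p :: t) cur cury = runsAux tol t (cur ++ [p]) cury from by
        simp [runsAux, hc]]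
      rw [ih (cur ++ [p]) cury]
      simp [List.takeWhile_cons, List.dropWhile_cons, hc]
    · rw [show runsAux tol (p :: t) cur cury = cur :: runsAux tol t [p] p.2 from by
        simp [runsAux, hc]]
      rw [ih [p] p.2]
      have hrw : runsOf tol (p :: t)
          = (p :: t.takeWhile (fun q => decide (|q.2 - p.2| ≤ tol)))
            :: runsOf tol (t.dropWhile (fun q => decide (|q.2 - p.2| ≤ tol))) := by
        rw [runsOf]
      simp [List.takeWhile_cons, List.dropWhile_cons, hc, hrw]

-- rows of a y-sorted list, each sorted by x, flattened = peel
theorem flat_runsOf_eq_peel (tol : Int) : ∀ n (s : List (Int × Int)), s.length ≤ n →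
    s.Pairwise (fun a b => a.2 ≤ b.2) →
    ((runsOf tol s).map (fun g => PySem.List.sorted g (fun p => p.1) false)).flatten
      = peel tol s := by
  intro n
  induction n with
  | zero =>
    intro s hs _
    have : s = [] := List.eq_nil_of_length_eq_zero (Nat.le_zero.mp hs)
    subst this
    simp [runsOf, peel]
  | succ n ih =>
    intro s hs hp
    cases s with
    | nil => simp [runsOf, peel]
    | cons h t =>
      rcases List.pairwise_cons.mp hp with ⟨hh, ht⟩
      rw [runsOf, peel]
      simp only [List.map_cons, List.flatten_cons]
      have hrow : (h :: t.takeWhile (fun p => decide (|p.2 - h.2| ≤ tol))).Pairwise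
          (fun a b => a.2 ≤ b.2) := by
        refine List.pairwise_cons.mpr ⟨?_, ht.sublist (List.takeWhile_sublist _)⟩
        intro y hy
        exact hh y ((List.takeWhile_sublist _).mem hy)
      rw [sortX_eq_sortLex hrow]
      congr 1
      exact ih _ (Nat.le_of_succ_le_succ (le_trans
          (Nat.succ_le_succ (List.length_dropWhile_le _ _)) hs))
        (ht.sublist (List.dropWhile_sublist _))

-- A equals peel of the y-sorted input (nonempty input)
theorem A_eq_peel (positions : List (Int × Int)) (tol : Int) (hne : positions ≠ []) :
    sort_grid_positions positions tol
      = peel tol (PySem.List.sorted positions (fun p => p.2) false) := by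
  unfold sort_grid_positions
  cases hsb : PySem.List.sorted positions (fun p => p.2) false with
  | nil =>
    exfalso
    exact hne ((PySem.List.sorted_eq_nil_iff _ _ _).mp hsb)
  | cons h t =>
    obtain ⟨hne', hA⟩ := foldA_char tol t [] [h] h.2 (by simp)
    have hEmp : (t.foldl (stepA tol) ([], [h], h.2)).2.1.isEmpty = false := by
      simpa [List.isEmpty_iff] using hne'
    simp only [hEmp, Bool.false_eq_true, if_false]
    have hP : (h :: t).Pairwise (fun a b : Int × Int => a.2 ≤ b.2) := by
      have := PySem.List.sorted_pairwise positions (fun p : Int × Int => p.2)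
      rwa [hsb] at this
    rw [show (t.foldl (stepA tol) ([], [h], h.2)).1 ++
          [PySem.List.sorted (t.foldl (stepA tol) ([], [h], h.2)).2.1 (fun p => p.1) false]
        = (runsAux tol t [h] h.2).map (fun g => PySem.List.sorted g (fun p => p.1) false) from
      by simpa using hA]
    rw [runsAux_eq_runsOf]
    rw [show ([h] ++ t.takeWhile fun p => decide (|p.2 - h.2| ≤ tol))
          :: runsOf tol (t.dropWhile fun p => decide (|p.2 - h.2| ≤ tol))
        = runsOf tol (h :: t) from by rw [runsOf]; simp]
    exact flat_runsOf_eq_peel tol (h :: t).length (h :: t) le_rfl hP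

-- B equals peel of the y-sorted input (all inputs)
theorem B_eq_peel (tol : Int) : ∀ n (remaining : List (Int × Int)), remaining.length ≤ n →
    goB tol remaining = peel tol (PySem.List.sorted remaining (fun p => p.2) false) := by
  intro n
  induction n with
  | zero =>
    intro remaining hlen
    have : remaining = [] := List.eq_nil_of_length_eq_zero (Nat.le_zero.mp hlen)
    subst this
    rw [goB]
    simp [PySem.List.min?, PySem.List.sorted, peel]
  | succ n ih =>
    intro remaining hlen
    rw [goB]
    split
    · next hm =>
      have : remaining = [] := (PySem.List.min?_eq_none_iff _ _).mp hm
      subst this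
      simp [PySem.List.sorted, peel]
    · next seed hm =>
      obtain ⟨u, v, rfl, hu⟩ := min?_split hm
      have hmin : ∀ q ∈ u ++ seed :: v, seed.2 ≤ q.2 := PySem.List.min?_isMin hm
      have hrem : PySem.List.remove? (u ++ seed :: v) seed = some (u ++ v) :=
        remove?_of_split fun q hq => fun he => absurd (he ▸ hu q hq) (lt_irrefl _)
      split
      · next hr => rw [hrem] at hr; exact absurd hr (by simp)
      · next rest hr =>
        rw [hrem] at hr
        obtain rfl : u ++ v = rest := Option.some.inj hr
        have hrest_min : ∀ q ∈ u ++ v, seed.2 ≤ q.2 := by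
          intro q hq
          rcases List.mem_append.mp hq with hq | hq
          · exact le_of_lt (hu q hq)
          · exact hmin q (by simp [hq])
        have hsorted_min : ∀ q ∈ PySem.List.sorted (u ++ v) (fun p => p.2) false, seed.2 ≤ q.2 :=
          fun q hq => hrest_min q ((PySem.List.mem_sorted _ _ _ _).mp hq)
        have hsc : PySem.List.sorted (u ++ seed :: v) (fun p => p.2) false
            = seed :: PySem.List.sorted (u ++ v) (fun p => p.2) false :=
          sorted_cons_of_min hu (fun q hq => hmin q (by simp [hq]))
        rw [hsc, peel]
        have hPW : (PySem.List.sorted (u ++ v) (fun p => p.2) false).Pairwise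
            (fun a b : Int × Int => a.2 ≤ b.2) := PySem.List.sorted_pairwise _ _
        have hmono : ∀ a ∈ PySem.List.sorted (u ++ v) (fun p => p.2) false,
            ∀ b ∈ PySem.List.sorted (u ++ v) (fun p => p.2) false, a.2 ≤ b.2 →
            decide (|b.2 - seed.2| ≤ tol) = true → decide (|a.2 - seed.2| ≤ tol) = true := by
          intro a ha b hb hab h
          have h1 := hsorted_min a ha
          have h2 := hsorted_min b hb
          simp only [decide_eq_true_eq] at h ⊢
          rw [abs_of_nonneg (by omega)] at h ⊢
          omega
        congr 1
        · -- the row sorts are sorts of permuted lists under an injective key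
          apply PySem.List.sorted_eq_sorted_of_perm _ _ _ klex_inj
          refine List.Perm.cons seed ?_
          rw [show (u ++ v).filter (fun p => decide (p.2 - seed.2 ≤ tol))
                = (u ++ v).filter (fun p => decide (|p.2 - seed.2| ≤ tol)) from
              List.filter_congr fun x hx => by
                have := hrest_min x hx
                rw [abs_of_nonneg (show (0:Int) ≤ x.2 - seed.2 by omega)]]
          rw [takeWhile_eq_filter_of_sorted hPW hmono]
          exact (List.Perm.filter _ (PySem.List.sorted_perm (u ++ v) (fun p => p.2) false)).symm
        · -- the recursive calls agree
          rw [dropWhile_eq_filter_of_sorted hPW hmono]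
          rw [show (PySem.List.sorted (u ++ v) (fun p => p.2) false).filter
                (fun a => !decide (|a.2 - seed.2| ≤ tol))
              = (PySem.List.sorted (u ++ v) (fun p => p.2) false).filter
                (fun p => decide (p.2 - seed.2 > tol)) from
            List.filter_congr fun x hx => by
              have := hsorted_min x hx
              rw [show |x.2 - seed.2| = x.2 - seed.2 from abs_of_nonneg (by omega)]
              by_cases hc : x.2 - seed.2 ≤ tol
              · simp [hc, (show ¬ x.2 - seed.2 > tol by omega)]
              · simp [hc, (show x.2 - seed.2 > tol by omega)]]
          rw [← sorted_filter]
          apply ih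
          have h1 : ((u ++ v).filter (fun p => decide (p.2 - seed.2 > tol))).length
              ≤ (u ++ v).length := List.length_filter_le _ _
          have h2 : (u ++ seed :: v).length = (u ++ v).length + 1 := by simp; omega
          omega

-- ===== VERDICT (by name: the statements are the Claim_ definitions above) =====
theorem sort_grid_positions_spec : Claim_equal_sort_grid_positions := by
  intro positions tol _ hpre
  unfold Spec_sort_grid_positions sort_grid_positions_alt
  rw [A_eq_peel positions tol hpre, B_eq_peel tol positions.length positions le_rfl]
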